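-- pv_equiv track=rewrite | github.com/x81u/FAST | FAST/functions.py | has_n_contiguous_pixels
-- ===== SOURCE A (Python) =====
-- def has_n_contiguous_pixels(check_list: list[bool], n: int) -> bool:
--     extended_check_list = check_list + check_list
--     count = 0
--     for i in extended_check_list:
--         if i:
--             count +=1
--             if count >= n:
--                 return True
--         else:
--             count = 0
--     return False
-- ===== SOURCE B (Python) =====
-- def has_n_contiguous_pixels(check_list: list[bool], n: int) -> bool:
--     extended = check_list + check_list
--     falses = [i for i, v in enumerate(extended) if not v]
--     boundaries = [-1] + falses + [len(extended)]
--     threshold = max(n, 1)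
--     return any(b - a - 1 >= threshold for a, b in zip(boundaries, boundaries[1:]))
-- ===== Notes on version B (the rewrite author's own statement) =====
-- stated objective: alternative
-- what changed: Instead of a resetting counter scan, B collects the index positions of the False pixels, brackets them with sentinel boundaries -1 and len, and decides the question by whether some gap between consecutive boundaries reaches max(n,1) (a nonempty True-run of length >= n).
import Mathlib
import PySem

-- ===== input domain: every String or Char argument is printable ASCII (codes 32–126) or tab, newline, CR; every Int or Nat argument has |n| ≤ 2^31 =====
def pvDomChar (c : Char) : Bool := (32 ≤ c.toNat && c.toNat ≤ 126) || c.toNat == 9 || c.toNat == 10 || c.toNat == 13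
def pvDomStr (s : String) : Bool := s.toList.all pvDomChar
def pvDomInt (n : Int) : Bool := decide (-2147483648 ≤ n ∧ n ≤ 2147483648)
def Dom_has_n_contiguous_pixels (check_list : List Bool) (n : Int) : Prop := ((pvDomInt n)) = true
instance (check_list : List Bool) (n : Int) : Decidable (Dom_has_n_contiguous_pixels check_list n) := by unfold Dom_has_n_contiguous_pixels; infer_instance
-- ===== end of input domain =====

-- B replaces A's resetting-counter scan by a boundary/gap formulation: collect the
-- positions of the False pixels, bracket them with sentinels -1 and len, and ask
-- whether some gap between consecutive boundaries reaches max(n,1); same linear cost.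

-- ===== PORT A =====
-- the for-loop over extended_check_list with its count accumulator (early return on count >= n)
def pvLoopA (n : Int) : List Bool → Int → Bool
  | [], _ => false
  | i :: rest, count =>
    if i then
      (if count + 1 ≥ n then true else pvLoopA n rest (count + 1))
    else
      pvLoopA n rest 0

def has_n_contiguous_pixels (check_list : List Bool) (n : Int) : Bool :=
  pvLoopA n (check_list ++ check_list) 0

-- ===== PORT B =====
def has_n_contiguous_pixels_alt (check_list : List Bool) (n : Int) : Bool :=
  let extended := check_list ++ check_list
  let falses := ((PySem.List.enumerate extended).filter (fun p => !p.2)).map (fun p => p.1)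
  let boundaries := (-1 : Int) :: falses ++ [(extended.length : Int)]
  let threshold := max n 1
  (boundaries.zip boundaries.tail).any (fun p => decide (p.2 - p.1 - 1 ≥ threshold))

-- ===== PRECONDITION & SPEC =====
def Spec_has_n_contiguous_pixels (check_list : List Bool) (n : Int) (out : Bool) : Prop := out = has_n_contiguous_pixels_alt check_list n
instance (check_list : List Bool) (n : Int) (out : Bool) : Decidable (Spec_has_n_contiguous_pixels check_list n out) := by unfold Spec_has_n_contiguous_pixels; infer_instance

-- ===== CLAIM (what is proved, stated in full; the proofs are below) =====
def Claim_equal_has_n_contiguous_pixels : Prop := ∀ (check_list : List Bool) (n : Int), Dom_has_n_contiguous_pixels check_list n → Spec_has_n_contiguous_pixels check_list n (has_n_contiguous_pixels check_list n)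

-- ===== LEMMAS AND PROOFS =====

-- Proof-only intermediate form of B's gap check: scan with current index i and the
-- position p of the last seen False boundary; at a False (and at the end) test the gap.
def pvGap (t : Int) : Int → Int → List Bool → Bool
  | p, i, [] => decide (i - p - 1 ≥ t)
  | p, i, b :: rest => if b then pvGap t p (i + 1) rest
                       else (decide (i - p - 1 ≥ t) || pvGap t i (i + 1) rest)

-- B's zip/any over the boundary list equals the pvGap scan.
theorem pvZip_eq_pvGap (t : Int) (xs : List Bool) :
    ∀ (p i : Int),
      (let falses := ((PySem.List.enumerate xs i).filter (fun q => !q.2)).map (fun q => q.1)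
       let bs := p :: falses ++ [i + (xs.length : Int)]
       (bs.zip bs.tail).any (fun q => decide (q.2 - q.1 - 1 ≥ t))) = pvGap t p i xs := by
  induction xs with
  | nil => intro p i; simp [PySem.List.enumerate, pvGap]
  | cons b rest ih =>
    intro p i
    cases b with
    | true =>
      have := ih p (i + 1)
      simp only [PySem.List.enumerate_cons, List.filter_cons] at *
      simpa [pvGap, List.length_cons, add_comm, add_left_comm, add_assoc] using this
    | false =>
      have h := ih i (i + 1)
      simp [pvGap, List.length_cons, add_comm, add_left_comm,
            PySem.List.enumerate_cons] at h ⊢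
      rw [h]

-- If the True-run already open has length ≥ t, the remaining gap scan returns true.
theorem pvGap_sat (t : Int) (xs : List Bool) :
    ∀ (p i : Int), i - p - 1 ≥ t → pvGap t p i xs = true := by
  induction xs with
  | nil => intro p i h; simp [pvGap]; omega
  | cons b rest ih =>
    intro p i h
    cases b with
    | true => simpa [pvGap] using ih p (i + 1) (by omega)
    | false => simp [pvGap]; exact Or.inl (by omega)

-- Invariant: while the open True-run (counter c = i - p - 1) is shorter than max n 1,
-- A's counter loop agrees with the gap scan.
theorem pvLoop_eq_pvGap (n : Int) (xs : List Bool) :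
    ∀ (p i c : Int), c = i - p - 1 → 0 ≤ c → c < max n 1 →
      pvLoopA n xs c = pvGap (max n 1) p i xs := by
  induction xs with
  | nil =>
    intro p i c hc hge hlt
    simp [pvLoopA, pvGap]; omega
  | cons b rest ih =>
    intro p i c hc hge hlt
    cases b with
    | true =>
      by_cases h : c + 1 ≥ max n 1
      · have hsat := pvGap_sat (max n 1) rest p (i + 1) (by omega)
        have hn : c + 1 ≥ n := by omega
        simp [pvLoopA, pvGap, hsat, hn]
      · have hn : ¬ c + 1 ≥ n := by omega
        simp only [pvLoopA, pvGap, if_neg hn, if_pos]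
        exact ih p (i + 1) (c + 1) (by omega) (by omega) (by omega)
    | false =>
      have hg : ¬ (i - p - 1 ≥ max n 1) := by omega
      simp [pvLoopA, pvGap, hg]
      exact ih i (i + 1) 0 (by omega) (by omega) (by omega)

-- ===== VERDICT (by name: the statement is the Claim_ definition above) =====
theorem has_n_contiguous_pixels_spec : Claim_equal_has_n_contiguous_pixels := by
  intro check_list n _
  unfold Spec_has_n_contiguous_pixels has_n_contiguous_pixels has_n_contiguous_pixels_alt
  have hz := pvZip_eq_pvGap (max n 1) (check_list ++ check_list) (-1) 0
  simp only [zero_add] at hz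
  rw [show pvLoopA n (check_list ++ check_list) 0
        = pvGap (max n 1) (-1) 0 (check_list ++ check_list) from
      pvLoop_eq_pvGap n (check_list ++ check_list) (-1) 0 0 (by ring) (by omega) (by omega)]
  exact hz.symm
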